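-- pv_equiv track=rewrite | github.com/parkyongjun1/programmers_algorithm | level_1/making_hambur.py | solution
-- ===== SOURCE A (Python) =====
-- def solution(ingredient):
--     answer = 0
--     count = 0
--     while count < len(ingredient)-3:
--         if ingredient[count:count+4] == [1,2,3,1]:
--             answer +=1
--             del ingredient[count:count+4]
--             if count < 4:
--                 count = 0
--             else:
--                 count -= 2
--         else:
--             count += 1
--     return answer
-- ===== SOURCE B (Python) =====
-- def solution(ingredient):
--     # Stack-based one pass: push each item, pop when the top four form [1,2,3,1].
--     # Note: unlike A, this does not mutate the caller's list.
--     stack = []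
--     answer = 0
--     for x in ingredient:
--         stack.append(x)
--         if stack[-4:] == [1, 2, 3, 1]:
--             del stack[-4:]
--             answer += 1
--     return answer
-- ===== Notes on version B (the rewrite author's own statement) =====
-- stated objective: faster
-- what changed: Replaces A's back-tracking scan with repeated slice deletion on the input by a single left-to-right pass maintaining a stack that pops whenever its top four elements form [1,2,3,1].
import Mathlib
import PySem

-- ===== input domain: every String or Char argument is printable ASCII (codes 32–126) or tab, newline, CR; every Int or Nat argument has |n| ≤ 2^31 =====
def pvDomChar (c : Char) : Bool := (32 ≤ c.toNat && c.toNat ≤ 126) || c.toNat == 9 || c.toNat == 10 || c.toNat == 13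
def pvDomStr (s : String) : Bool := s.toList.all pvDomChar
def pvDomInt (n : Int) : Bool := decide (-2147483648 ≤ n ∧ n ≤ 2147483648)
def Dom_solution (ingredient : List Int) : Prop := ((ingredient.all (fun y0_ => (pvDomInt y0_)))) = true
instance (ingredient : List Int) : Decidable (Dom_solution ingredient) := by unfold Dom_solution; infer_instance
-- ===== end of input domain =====

-- B replaces A's quadratic back-tracking scan (with slice deletion) by a single stack pass;
-- A mutates its argument in place (del), B does not — the equivalence proved is about the return value.

-- ===== PORT A =====
-- A's while-loop: count is a Python int that provably stays ≥ 0 (it starts at 0, is reset to 0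
-- when < 4, otherwise decremented by 2 from ≥ 4), so it is carried as a Nat; the guard
-- `count < len(ingredient)-3` (Python int arithmetic) is `count + 3 < len` for count ≥ 0.
def solutionLoop (lst : List Int) (count : Nat) (ans : Int) : Int :=
  if _h : count + 3 < lst.length then
    -- ingredient[count:count+4] == [1,2,3,1]
    if PySem.List.slice lst (some (count : Int)) (some ((count : Int) + (4 : Int))) = [1, 2, 3, 1] then
      -- del ingredient[count:count+4]  →  ingredient[:count] + ingredient[count+4:]
      solutionLoop
        (PySem.List.slice lst none (some (count : Int)) ++
         PySem.List.slice lst (some ((count : Int) + (4 : Int))) none)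
        (if count < 4 then 0 else count - 2) (ans + 1)
    else
      solutionLoop lst (count + 1) ans
  else ans
termination_by 2 * lst.length - count
decreasing_by
  · have h1 : PySem.List.slice lst none (some ((count : Nat) : Int)) = lst.take count :=
      PySem.List.slice_to_natCast lst count
    have hc : ((count : Int) + (4 : Int)) = (((count + 4 : Nat)) : Int) := by push_cast; ring
    have h2 : PySem.List.slice lst (some ((count : Int) + (4 : Int))) none = lst.drop (count + 4) := by
      rw [hc, PySem.List.slice_from_natCast]
    rw [h1, h2]
    simp only [List.length_append, List.length_take, List.length_drop]
    split_ifs <;> omega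
  · omega

def solution (ingredient : List Int) : Int :=
  solutionLoop ingredient 0 0

-- ===== PORT B =====
-- one step of B's for-loop: push x; if stack[-4:] == [1,2,3,1] then stack = stack[:-4], answer += 1
def altStep (s : List Int × Int) (x : Int) : List Int × Int :=
  let st := s.1 ++ [x]
  if PySem.List.slice st (some (-4 : Int)) none = [1, 2, 3, 1] then
    (PySem.List.slice st none (some (-4 : Int)), s.2 + 1)
  else (st, s.2)

def solution_alt (ingredient : List Int) : Int :=
  (ingredient.foldl altStep ([], 0)).2

-- ===== PRECONDITION & SPEC =====
def Spec_solution (ingredient : List Int) (out : Int) : Prop := out = solution_alt ingredient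
instance (ingredient : List Int) (out : Int) : Decidable (Spec_solution ingredient out) := by unfold Spec_solution; infer_instance

-- ===== CLAIM (what is proved, stated in full; the proofs are below) =====
def Claim_equal_solution : Prop := ∀ (ingredient : List Int), Dom_solution ingredient → Spec_solution ingredient (solution ingredient)

-- ===== LEMMAS AND PROOFS =====

-- a window match of [1,2,3,1] at position p
def matchAtB (l : List Int) (p : Nat) : Bool := decide ((l.drop p).take 4 = [1, 2, 3, 1])

theorem take4_iff (d : List Int) :
    d.take 4 = [1, 2, 3, 1] ↔
      (d[0]? = some 1 ∧ d[1]? = some 2 ∧ d[2]? = some 3 ∧ d[3]? = some 1) := by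
  rcases d with _ | ⟨a, _ | ⟨b, _ | ⟨c, _ | ⟨e, rest⟩⟩⟩⟩ <;> simp [List.take]

theorem matchAtB_iff (l : List Int) (p : Nat) :
    matchAtB l p = true ↔
      (l[p]? = some 1 ∧ l[p + 1]? = some 2 ∧ l[p + 2]? = some 3 ∧ l[p + 3]? = some 1) := by
  have hd0 : (l.drop p)[0]? = l[p]? := by rw [List.getElem?_drop]; simp
  have hd1 : (l.drop p)[1]? = l[p + 1]? := by rw [List.getElem?_drop]
  have hd2 : (l.drop p)[2]? = l[p + 2]? := by rw [List.getElem?_drop]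
  have hd3 : (l.drop p)[3]? = l[p + 3]? := by rw [List.getElem?_drop]
  unfold matchAtB
  rw [decide_eq_true_iff, take4_iff, hd0, hd1, hd2, hd3]

theorem matchAtB_len {l : List Int} {p : Nat} (h : matchAtB l p = true) : p + 4 ≤ l.length := by
  rw [matchAtB_iff] at h
  have h3 := h.2.2.2
  have : p + 3 < l.length := by
    by_contra hc
    rw [List.getElem?_eq_none (by omega)] at h3
    simp at h3
  omega

theorem lrc_ex {l : List Int} (h : (List.range l.length).any (fun p => matchAtB l p) = true) :
    ∃ p, matchAtB l p = true := by
  rw [List.any_eq_true] at h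
  obtain ⟨p, _, hp⟩ := h
  exact ⟨p, hp⟩

-- leftmost-reduction count: repeatedly delete the leftmost [1,2,3,1] window
def lrc (l : List Int) : Int :=
  if h : (List.range l.length).any (fun p => matchAtB l p) = true then
    let p := Nat.find (lrc_ex h)
    1 + lrc (l.take p ++ l.drop (p + 4))
  else 0
termination_by l.length
decreasing_by
  have hm : matchAtB l (Nat.find (lrc_ex h)) = true := Nat.find_spec (lrc_ex h)
  have := matchAtB_len hm
  simp only [List.length_append, List.length_take, List.length_drop]
  omega

theorem lrc_zero {l : List Int} (h : ∀ p, matchAtB l p = false) : lrc l = 0 := by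
  rw [lrc]
  rw [dif_neg]
  simp [List.any_eq_true, h]

theorem lrc_step {l : List Int} {p : Nat} (hp : matchAtB l p = true)
    (hmin : ∀ q < p, matchAtB l q = false) :
    lrc l = 1 + lrc (l.take p ++ l.drop (p + 4)) := by
  have hlen := matchAtB_len hp
  have hany : (List.range l.length).any (fun p => matchAtB l p) = true := by
    rw [List.any_eq_true]; exact ⟨p, List.mem_range.2 (by omega), hp⟩
  rw [lrc, dif_pos hany]
  have hfind : Nat.find (lrc_ex hany) = p := by
    rw [Nat.find_eq_iff]
    exact ⟨hp, fun q hq => by rw [hmin q hq]; simp⟩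
  simp only [hfind]

theorem cut_get {l : List Int} {p : Nat} (hp : p + 4 ≤ l.length) (i : Nat) :
    (l.take p ++ l.drop (p + 4))[i]? = if i < p then l[i]? else l[i + 4]? := by
  by_cases hi : i < p
  · rw [List.getElem?_append_left (by simp; omega), if_pos hi, List.getElem?_take_of_lt hi]
  · rw [List.getElem?_append_right (by simp; omega), if_neg hi]
    simp only [List.length_take]
    rw [List.getElem?_drop]
    congr 1
    omega

theorem matchAt_append_left {l : List Int} (ys : List Int) {p : Nat} (h : p + 4 ≤ l.length) :
    matchAtB (l ++ ys) p = matchAtB l p := by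
  have e0 : (l ++ ys)[p]? = l[p]? := List.getElem?_append_left (by omega)
  have e1 : (l ++ ys)[p + 1]? = l[p + 1]? := List.getElem?_append_left (by omega)
  have e2 : (l ++ ys)[p + 2]? = l[p + 2]? := List.getElem?_append_left (by omega)
  have e3 : (l ++ ys)[p + 3]? = l[p + 3]? := List.getElem?_append_left (by omega)
  rw [Bool.eq_iff_iff, matchAtB_iff, matchAtB_iff, e0, e1, e2, e3]

theorem matchAt_take {l : List Int} {k p : Nat} (h : matchAtB (l.take k) p = true) :
    matchAtB l p = true := by
  have hlen := matchAtB_len h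
  have hk : p + 4 ≤ k := by
    simp only [List.length_take] at hlen; omega
  have e0 : (l.take k)[p]? = l[p]? := List.getElem?_take_of_lt (by omega)
  have e1 : (l.take k)[p + 1]? = l[p + 1]? := List.getElem?_take_of_lt (by omega)
  have e2 : (l.take k)[p + 2]? = l[p + 2]? := List.getElem?_take_of_lt (by omega)
  have e3 : (l.take k)[p + 3]? = l[p + 3]? := List.getElem?_take_of_lt (by omega)
  rw [matchAtB_iff] at h ⊢
  rw [e0, e1, e2, e3] at h
  exact h

-- ===== B = lrc =====
theorem altRun (xs : List Int) (st : List Int) (ans : Int)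
    (hfree : ∀ p, matchAtB st p = false) :
    (xs.foldl altStep (st, ans)).2 = ans + lrc (st ++ xs) := by
  induction xs generalizing st ans with
  | nil => simp [lrc_zero hfree]
  | cons x rest ih =>
    have hstep : ∀ s : List Int × Int, List.foldl altStep s (x :: rest) =
        List.foldl altStep (altStep s x) rest := fun s => rfl
    set st' := st ++ [x] with hst'
    have hlen' : st'.length = st.length + 1 := by simp [hst']
    have hneg4 : PySem.List.slice st' (some (-4 : Int)) none = st'.drop (st'.length - 4) :=
      PySem.List.slice_from_neg_ofNat st' 4 (by omega)
    have hto4 : PySem.List.slice st' none (some (-4 : Int)) = st'.take (st'.length - 4) :=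
      PySem.List.slice_to_neg_ofNat st' 4 (by omega)
    by_cases hc : st'.drop (st'.length - 4) = [1, 2, 3, 1]
    · -- the top four match: pop
      have hn3 : 3 ≤ st.length := by
        by_contra hn
        have : st'.length - 4 = 0 := by omega
        rw [this, List.drop_zero] at hc
        have := congrArg List.length hc
        simp [hlen'] at this
        omega
      set n := st.length with hn
      have hidx : st'.length - 4 = n - 3 := by omega
      have hdlen : (st'.drop (n - 3)).length = 4 := by simp [hlen']; omega
      have hm' : matchAtB st' (n - 3) = true := by
        unfold matchAtB
        rw [decide_eq_true_iff, List.take_of_length_le (by omega)]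
        rw [hidx] at hc; exact hc
      have hmfull : matchAtB (st' ++ rest) (n - 3) = true := by
        rw [matchAt_append_left rest (by omega)]; exact hm'
      have hminfull : ∀ q < n - 3, matchAtB (st' ++ rest) q = false := by
        intro q hq
        have : st' ++ rest = st ++ ([x] ++ rest) := by simp [hst']
        rw [this, matchAt_append_left ([x] ++ rest) (by omega)]
        exact hfree q
      have hstep' : lrc (st' ++ rest) = 1 + lrc (st'.take (n - 3) ++ rest) := by
        have h1 : (st' ++ rest).take (n - 3) = st'.take (n - 3) :=
          List.take_append_of_le_length (by omega)
        have h2 : (st' ++ rest).drop (n - 3 + 4) = rest := by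
          have he : n - 3 + 4 = st'.length := by omega
          rw [he, List.drop_left]
        rw [lrc_step hmfull hminfull, h1, h2]
      have hfree'' : ∀ p, matchAtB (st'.take (n - 3)) p = false := by
        intro p
        rcases hb : matchAtB (st'.take (n - 3)) p with _ | _
        · rfl
        · exfalso
          have htk : st'.take (n - 3) = st.take (n - 3) := by
            rw [hst', List.take_append_of_le_length (by omega)]
          rw [htk] at hb
          have := matchAt_take hb
          rw [hfree p] at this
          exact Bool.noConfusion this
      rw [hstep]
      have hunf : altStep (st, ans) x = (st'.take (st'.length - 4), ans + 1) := by
        unfold altStep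
        rw [← hst']
        simp only [hneg4, hto4]
        rw [if_pos hc]
      rw [hunf, hidx]
      rw [ih _ _ hfree'']
      have : st ++ x :: rest = st' ++ rest := by simp [hst']
      rw [this, hstep']
      ring
    · -- no pop: st' stays pattern-free
      have hfree' : ∀ p, matchAtB st' p = false := by
        intro p
        rcases hb : matchAtB st' p with _ | _
        · rfl
        · exfalso
          have hlen4 := matchAtB_len hb
          by_cases hp : p + 4 ≤ st.length
          · rw [hst', matchAt_append_left [x] hp, hfree p] at hb
            exact Bool.noConfusion hb
          · have hpe : p = st'.length - 4 := by omega
            unfold matchAtB at hb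
            rw [decide_eq_true_iff] at hb
            rw [List.take_of_length_le (by simp [hlen']; omega)] at hb
            rw [hpe] at hb
            exact hc hb
      rw [hstep]
      have hunf : altStep (st, ans) x = (st', ans) := by
        unfold altStep
        rw [← hst']
        simp only [hneg4, hto4]
        rw [if_neg hc]
      rw [hunf, ih _ _ hfree']
      have : st ++ x :: rest = st' ++ rest := by simp [hst']
      rw [this]

-- ===== A = lrc =====
theorem Arun (l : List Int) (count : Nat) (ans : Int)
    (hinv : ∀ q < count, matchAtB l q = false) :
    solutionLoop l count ans = ans + lrc l := by
  induction l, count, ans using solutionLoop.induct with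
  | case1 l count ans hguard hcond ih =>
    -- match at `count`
    have hc4 : ((count : Int) + (4 : Int)) = (((count + 4 : Nat)) : Int) := by push_cast; ring
    have hm : matchAtB l count = true := by
      unfold matchAtB
      rw [decide_eq_true_iff]
      rw [hc4, PySem.List.slice_natCast] at hcond
      have : count + 4 - count = 4 := by omega
      rw [this] at hcond
      exact hcond
    have hlen := matchAtB_len hm
    have hcut : PySem.List.slice l none (some (count : Int)) ++
        PySem.List.slice l (some ((count : Int) + (4 : Int))) none =
        l.take count ++ l.drop (count + 4) := by
      rw [PySem.List.slice_to_natCast, hc4, PySem.List.slice_from_natCast]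
    have hinv' : ∀ q < (if count < 4 then 0 else count - 2),
        matchAtB (l.take count ++ l.drop (count + 4)) q = false := by
      intro q hq
      split_ifs at hq with h4
      · omega
      · -- count ≥ 4, q < count - 2, so q + 3 ≤ count
        have hq3 : q + 3 ≤ count := by omega
        rcases hb : matchAtB (l.take count ++ l.drop (count + 4)) q with _ | _
        · rfl
        · exfalso
          rw [matchAtB_iff] at hb
          obtain ⟨h1, h2, h3, h4'⟩ := hb
          rw [cut_get hlen, if_pos (by omega)] at h1
          rw [cut_get hlen, if_pos (by omega)] at h2
          rw [cut_get hlen, if_pos (by omega)] at h3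
          rw [cut_get hlen] at h4'
          by_cases hq3' : q + 3 < count
          · rw [if_pos hq3'] at h4'
            have : matchAtB l q = true := by
              rw [matchAtB_iff]; exact ⟨h1, h2, h3, h4'⟩
            rw [hinv q (by omega)] at this
            exact Bool.noConfusion this
          · -- q + 3 = count: the exposed window was already a match at q in l
            have hqe : q + 3 = count := by omega
            have hl1 : l[count]? = some 1 := ((matchAtB_iff l count).1 hm).1
            have : matchAtB l q = true := by
              rw [matchAtB_iff]
              exact ⟨h1, h2, h3, by rw [hqe]; exact hl1⟩
            rw [hinv q (by omega)] at this
            exact Bool.noConfusion this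
    have hinv'' : ∀ q < (if _h : count < 4 then 0 else count - 2),
        matchAtB (PySem.List.slice l none (some (count : Int)) ++
          PySem.List.slice l (some ((count : Int) + (4 : Int))) none) q = false := by
      intro q hq
      rw [hcut]
      refine hinv' q ?_
      simpa only [dite_eq_ite] using hq
    have ih' := ih hinv''
    simp only [dite_eq_ite] at ih'
    rw [hcut] at ih'
    rw [solutionLoop, dif_pos hguard, if_pos hcond, hcut, ih',
      lrc_step hm (fun q hq => hinv q hq)]
    ring
  | case2 l count ans hguard hcond ih =>
    have hinv' : ∀ q < count + 1, matchAtB l q = false := by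
      intro q hq
      by_cases hqc : q < count
      · exact hinv q hqc
      · have hqe : q = count := by omega
        subst hqe
        rcases hb : matchAtB l q with _ | _
        · rfl
        · exfalso
          unfold matchAtB at hb
          rw [decide_eq_true_iff] at hb
          apply hcond
          have hc4 : ((q : Int) + (4 : Int)) = (((q + 4 : Nat)) : Int) := by push_cast; ring
          rw [hc4, PySem.List.slice_natCast]
          have : q + 4 - q = 4 := by omega
          rw [this]
          exact hb
    rw [solutionLoop, dif_pos hguard, if_neg hcond]
    exact ih hinv'
  | case3 l count ans hguard =>
    have hfree : ∀ p, matchAtB l p = false := by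
      intro p
      rcases hb : matchAtB l p with _ | _
      · rfl
      · exfalso
        have := matchAtB_len hb
        have : p < count := by omega
        rw [hinv p this] at hb
        exact Bool.noConfusion hb
    rw [solutionLoop, dif_neg hguard, lrc_zero hfree]
    ring

-- ===== VERDICT (by name: the statement is the Claim_ definition above) =====
theorem solution_spec : Claim_equal_solution := by
  intro ingredient _
  unfold Spec_solution solution solution_alt
  rw [Arun ingredient 0 0 (fun q hq => absurd hq (by omega))]
  rw [altRun ingredient [] 0 (fun p => by unfold matchAtB; simp)]
  simp
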